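-- pv_equiv track=rewrite | github.com/Gsirawan/engram-memory | scripts/convert_opencode.py | _collapse_code_blocks
-- ===== SOURCE A (Python) =====
-- def _collapse_code_blocks(text: str) -> str:
--     """Replace code blocks >10 lines with collapsed summary."""
--     lines = text.split("\n")
--     result = []
--     i = 0
--
--     while i < len(lines):
--         line = lines[i]
--
--         # Detect code block start (```language or just ```)
--         if line.strip().startswith("```"):
--             code_lines = [line]
--             i += 1
--
--             # Collect code block lines
--             while i < len(lines) and not lines[i].strip().startswith("```"):
--                 code_lines.append(lines[i])
--                 i += 1
--
--             # Include closing ```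
--             if i < len(lines):
--                 code_lines.append(lines[i])
--                 i += 1
--
--             # If block is >10 lines, collapse it
--             if len(code_lines) > 10:
--                 first_line = code_lines[0].strip()
--                 if first_line.startswith("```"):
--                     first_line = first_line[3:].strip()
--                 if not first_line:
--                     first_line = (
--                         code_lines[1].strip() if len(code_lines) > 1 else "code"
--                     )
--
--                 result.append(
--                     f"[code block: {first_line}... ({len(code_lines)} lines)]"
--                 )
--             else:
--                 result.extend(code_lines)
--         else:
--             # Check for file dump (very long single line with code indicators)
--             if len(line) > 500 and any(
--                 indicator in line
--                 for indicator in ["def ", "class ", "import ", "function ", "{"]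
--             ):
--                 result.append("[file dump: long code output stripped]")
--             else:
--                 result.append(line)
--             i += 1
--
--     return "\n".join(result)
-- ===== SOURCE B (Python) =====
-- def _collapse_code_blocks(text: str) -> str:
--     """Collapse >10-line fenced blocks: locate all fences in one pass, pair them
--     into (open, close) index pairs, then assemble the output from slices."""
--     lines = text.split("\n")
--     fences = [i for i, ln in enumerate(lines) if ln.strip().startswith("```")]
--     blocks = []
--     k = 0
--     while k + 1 < len(fences):
--         blocks.append((fences[k], fences[k + 1]))
--         k += 2
--     if k < len(fences):
--         blocks.append((fences[k], len(lines) - 1))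
--     result = []
--     prev = 0
--     for s, e in blocks:
--         result.extend(_scan(lines[prev:s]))
--         block = lines[s:e + 1]
--         if len(block) > 10:
--             info = block[0].strip()[3:].strip() or block[1].strip()
--             result.append(f"[code block: {info}... ({len(block)} lines)]")
--         else:
--             result.extend(block)
--         prev = e + 1
--     result.extend(_scan(lines[prev:]))
--     return "\n".join(result)
--
--
-- def _scan(lines):
--     out = []
--     for line in lines:
--         if len(line) > 500 and any(
--             ind in line for ind in ("def ", "class ", "import ", "function ", "{")
--         ):
--             out.append("[file dump: long code output stripped]")
--         else:
--             out.append(line)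
--     return out
-- ===== Notes on version B (the rewrite author's own statement) =====
-- stated objective: alternative
-- what changed: Replaced A's nested index-advancing streaming loop by two staged passes: first locate all fence-line indices and pair them into (open, close) blocks (with an unclosed tail paired to the last line), then assemble the output from list slices - scanning the fence-free gaps for file dumps and collapsing >10-line block slices.
import Mathlib
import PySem

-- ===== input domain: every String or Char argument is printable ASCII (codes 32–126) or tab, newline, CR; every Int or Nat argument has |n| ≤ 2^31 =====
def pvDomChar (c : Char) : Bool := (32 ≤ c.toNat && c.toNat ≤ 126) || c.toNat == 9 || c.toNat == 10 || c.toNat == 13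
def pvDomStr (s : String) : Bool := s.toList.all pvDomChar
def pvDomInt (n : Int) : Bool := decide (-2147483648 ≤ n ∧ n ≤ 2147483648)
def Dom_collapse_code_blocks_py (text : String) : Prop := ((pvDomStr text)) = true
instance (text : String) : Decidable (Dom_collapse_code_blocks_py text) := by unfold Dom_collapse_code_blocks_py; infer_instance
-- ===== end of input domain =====

-- B replaces A's nested streaming while-loops by two staged passes: first locate ALL
-- fence lines and pair their indices into (open, close) blocks, then assemble the
-- output from list slices (objective: alternative decomposition, same cost).

-- shared one-line tests (the identical Python expressions appear in both programs):
-- line.strip().startswith("```")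
def pvIsFence (line : String) : Bool := PySem.Str.startswith (PySem.Str.strip line) "```"
-- len(line) > 500 and any(indicator in line for ...) → sentinel, else the line itself
def pvDumpLine (line : String) : String :=
  if 500 < PySem.Str.len line &&
      (PySem.Str.isIn "def " line || PySem.Str.isIn "class " line ||
       PySem.Str.isIn "import " line || PySem.Str.isIn "function " line ||
       PySem.Str.isIn "{" line) then
    "[file dump: long code output stripped]"
  else line

-- ===== PORT A =====
-- the inner while loop: collect lines until a fence line (which is included), return the rest
def pvCollectA : List String → List String × List String
  | [] => ([], [])
  | l :: ls =>
    if pvIsFence l then ([l], ls)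
    else
      let p := pvCollectA ls
      (l :: p.1, p.2)

lemma pvCollectA_len (ls : List String) : (pvCollectA ls).2.length ≤ ls.length := by
  induction ls with
  | nil => simp [pvCollectA]
  | cons l ls ih =>
    simp only [pvCollectA]
    split
    · simp
    · simpa using Nat.le_succ_of_le ih

-- the collapse of a >10-line block, A's inline code
def pvSummaryA (code_lines : List String) : String :=
  let first_line := PySem.Str.strip (PySem.List.pyGetD code_lines 0 "")
  let first_line :=
    if PySem.Str.startswith first_line "```" then
      PySem.Str.strip (PySem.Str.slice first_line (some 3) none)
    else first_line
  let first_line :=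
    if first_line = "" then
      (if 1 < PySem.List.len code_lines then PySem.Str.strip (PySem.List.pyGetD code_lines 1 "")
       else "code")
    else first_line
  "[code block: " ++ first_line ++ "... (" ++ PySem.Int.toStr (PySem.List.len code_lines) ++ " lines)]"

def pvGoA : List String → List String
  | [] => []
  | line :: rest =>
    if pvIsFence line then
      (if 10 < PySem.List.len (line :: (pvCollectA rest).1) then
         [pvSummaryA (line :: (pvCollectA rest).1)]
       else line :: (pvCollectA rest).1) ++ pvGoA (pvCollectA rest).2
    else
      pvDumpLine line :: pvGoA rest
termination_by ls => ls.length
decreasing_by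
  · exact Nat.lt_succ_of_le (pvCollectA_len rest)
  · simp

def collapse_code_blocks_py (text : String) : String :=
  PySem.Str.join "\n" (pvGoA ((PySem.Str.split? text "\n").getD []))

-- ===== PORT B =====
-- info = block[0].strip()[3:].strip() or block[1].strip()
def pvSummaryB (block : List String) : String :=
  let t := PySem.Str.strip (PySem.Str.slice (PySem.Str.strip (PySem.List.pyGetD block 0 "")) (some 3) none)
  let info := if t = "" then PySem.Str.strip (PySem.List.pyGetD block 1 "") else t
  "[code block: " ++ info ++ "... (" ++ PySem.Int.toStr (PySem.List.len block) ++ " lines)]"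

-- helper _scan: the file-dump check over a fence-free segment
def pvScanB (ls : List String) : List String := ls.map pvDumpLine

-- pass 1: [i for i, ln in enumerate(lines) if ln.strip().startswith("```")]
def pvFencesB (ls : List String) : List Int :=
  (PySem.List.enumerate ls 0).filterMap (fun p => if pvIsFence p.2 then some p.1 else none)

-- the while-k-by-2 loop pairing consecutive fences, plus the unclosed tail (fences[k], len(lines)-1)
def pvPairsB : List Int → Int → List (Int × Int)
  | a :: b :: rest, n => (a, b) :: pvPairsB rest n
  | [a], n => [(a, n - 1)]
  | [], _ => []

-- pass 2: the for s, e in blocks loop with prev, assembling from slices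
def pvEmitB (ls : List String) : List (Int × Int) → Int → List String
  | [], prev => pvScanB (PySem.List.slice ls (some prev) none)
  | (s, e) :: bs, prev =>
      pvScanB (PySem.List.slice ls (some prev) (some s)) ++
      (if 10 < PySem.List.len (PySem.List.slice ls (some s) (some (e + 1))) then
         [pvSummaryB (PySem.List.slice ls (some s) (some (e + 1)))]
       else PySem.List.slice ls (some s) (some (e + 1))) ++
      pvEmitB ls bs (e + 1)

def collapse_code_blocks_py_alt (text : String) : String :=
  let lines := (PySem.Str.split? text "\n").getD []
  PySem.Str.join "\n" (pvEmitB lines (pvPairsB (pvFencesB lines) (PySem.List.len lines)) 0)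

-- ===== PRECONDITION & SPEC =====
def Spec_collapse_code_blocks_py (text : String) (out : String) : Prop := out = collapse_code_blocks_py_alt text
instance (text : String) (out : String) : Decidable (Spec_collapse_code_blocks_py text out) := by unfold Spec_collapse_code_blocks_py; infer_instance

-- ===== CLAIM (what is proved, stated in full; the proofs are below) =====
def Claim_equal_collapse_code_blocks_py : Prop := ∀ (text : String), Dom_collapse_code_blocks_py text → Spec_collapse_code_blocks_py text (collapse_code_blocks_py text)

-- ===== LEMMAS AND PROOFS =====

-- Nat-index mirrors of B's Int-index passes (used only by the proofs)
def pvFencesN : List String → List Nat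
  | [] => []
  | l :: t => if pvIsFence l then 0 :: (pvFencesN t).map (· + 1) else (pvFencesN t).map (· + 1)

def pvPairsN : List Nat → Nat → List (Nat × Nat)
  | a :: b :: rest, n => (a, b) :: pvPairsN rest n
  | [a], n => [(a, n - 1)]
  | [], _ => []

def pvFlushN (block : List String) : List String :=
  if 10 < block.length then [pvSummaryB block] else block

def pvEmitN (ls : List String) : List (Nat × Nat) → Nat → List String
  | [], prev => (ls.drop prev).map pvDumpLine
  | (s, e) :: bs, prev =>
      ((ls.drop prev).take (s - prev)).map pvDumpLine ++
      pvFlushN ((ls.drop s).take (e + 1 - s)) ++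
      pvEmitN ls bs (e + 1)

-- On a block whose first line is a fence and that has ≥ 2 lines, the two summaries agree.
lemma pvSummary_eq (buf : List String) (hf : pvIsFence (PySem.List.pyGetD buf 0 "") = true)
    (hlen : 2 ≤ buf.length) : pvSummaryA buf = pvSummaryB buf := by
  unfold pvIsFence at hf
  have h1 : (1 : Int) < PySem.List.len buf := by
    simp only [PySem.List.len_eq]; exact_mod_cast hlen
  simp only [pvSummaryA, pvSummaryB, hf, if_true, h1]

-- A's block emission equals pvFlushN, for blocks starting with a fence line.
lemma pvFlush_eq (buf : List String) (hf : pvIsFence (PySem.List.pyGetD buf 0 "") = true) :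
    (if 10 < PySem.List.len buf then [pvSummaryA buf] else buf) = pvFlushN buf := by
  unfold pvFlushN
  simp only [PySem.List.len_eq]
  split
  · next h =>
    rw [if_pos (by exact_mod_cast h), pvSummary_eq buf hf (by omega)]
  · next h =>
    rw [if_neg (by intro hc; exact h (by exact_mod_cast hc))]

-- ===== bridges: B's Int-index port equals the Nat-index mirror =====

lemma pvFencesB_shift (ls : List String) (s : Int) :
    (PySem.List.enumerate ls s).filterMap (fun p => if pvIsFence p.2 then some p.1 else none)
      = (pvFencesN ls).map (fun (n : Nat) => (n : Int) + s) := by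
  induction ls generalizing s with
  | nil => simp [PySem.List.enumerate_nil, pvFencesN]
  | cons l t ih =>
    rw [PySem.List.enumerate_cons]
    simp only [List.filterMap_cons]
    by_cases hf : pvIsFence l = true
    · simp only [hf, if_true, ih (s + 1), pvFencesN, List.map_cons]
      rw [List.map_map]
      congr 1
      · simp
      · apply List.map_congr_left; intro a _
        simp only [Function.comp_apply]; push_cast; ring
    · simp only [Bool.not_eq_true] at hf
      simp only [hf, Bool.false_eq_true, if_false, ih (s + 1), pvFencesN]
      rw [List.map_map]
      apply List.map_congr_left; intro a _
      simp only [Function.comp_apply]; push_cast; ring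

lemma pvFencesB_eq (ls : List String) :
    pvFencesB ls = (pvFencesN ls).map (fun (n : Nat) => (n : Int)) := by
  unfold pvFencesB
  rw [pvFencesB_shift ls 0]
  simp

lemma pvPairsB_eq : ∀ (fs : List Nat) (n : Nat), (fs ≠ [] → 1 ≤ n) →
    pvPairsB (fs.map (fun (k : Nat) => (k : Int))) (n : Int)
      = (pvPairsN fs n).map (fun (p : Nat × Nat) => ((p.1 : Int), (p.2 : Int)))
  | [], n, _ => by simp [pvPairsB, pvPairsN]
  | [a], n, h => by
    have h1 : 1 ≤ n := h (by simp)
    simp only [List.map_cons, pvPairsB, pvPairsN, List.map]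
    congr 1
    simp
    omega
  | a :: b :: rest, n, h => by
    simp only [List.map_cons, pvPairsB, pvPairsN, List.map]
    rw [pvPairsB_eq rest n (by intro _; exact h (by simp))]

lemma pvEmitB_eq (bs : List (Nat × Nat)) (ls : List String) (prev : Nat) :
    pvEmitB ls (bs.map (fun (p : Nat × Nat) => ((p.1 : Int), (p.2 : Int)))) (prev : Nat)
      = pvEmitN ls bs prev := by
  induction bs generalizing prev with
  | nil =>
    simp only [List.map_nil, pvEmitB, pvEmitN, pvScanB]
    rw [PySem.List.slice_from_natCast]
  | cons p bs ih =>
    obtain ⟨s, e⟩ := p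
    simp only [List.map_cons, pvEmitB, pvEmitN, pvScanB, pvFlushN]
    have he1 : ((e : Int) + 1) = ((e + 1 : Nat) : Int) := by push_cast; ring
    rw [he1, PySem.List.slice_natCast, PySem.List.slice_natCast, ih (e + 1)]
    simp only [PySem.List.len_eq]
    congr 2
    split
    · next h => rw [if_pos (by exact_mod_cast h)]
    · next h => rw [if_neg (by intro hc; exact h (by exact_mod_cast hc))]

lemma pvAlt_eq (ls : List String) :
    pvEmitB ls (pvPairsB (pvFencesB ls) (PySem.List.len ls)) 0
      = pvEmitN ls (pvPairsN (pvFencesN ls) ls.length) 0 := by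
  rw [pvFencesB_eq, PySem.List.len_eq,
      pvPairsB_eq (pvFencesN ls) ls.length
        (by intro hne; cases ls with
            | nil => simp [pvFencesN] at hne
            | cons a t => simp)]
  exact_mod_cast pvEmitB_eq (pvPairsN (pvFencesN ls) ls.length) ls 0

-- ===== structure lemmas for the Nat mirror =====

lemma pvEmitN_nil (bs : List (Nat × Nat)) (prev : Nat) : pvEmitN [] bs prev = [] := by
  induction bs generalizing prev with
  | nil => simp [pvEmitN]
  | cons p bs ih => obtain ⟨s, e⟩ := p; simp [pvEmitN, pvFlushN, ih]

-- shift by one: a cons on the lines and +1 on every index cancel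
lemma pvEmitN_shift1 (bs : List (Nat × Nat)) (ls : List String) (l : String) (prev : Nat) :
    pvEmitN (l :: ls) (bs.map (fun p => (p.1 + 1, p.2 + 1))) (prev + 1)
      = pvEmitN ls bs prev := by
  induction bs generalizing prev with
  | nil => simp [pvEmitN]
  | cons p bs ih =>
    obtain ⟨s, e⟩ := p
    simp only [List.map_cons, pvEmitN, List.drop_succ_cons]
    rw [show s + 1 - (prev + 1) = s - prev by omega,
        show e + 1 + 1 - (s + 1) = e + 1 - s by omega, ih (e + 1)]

lemma pvEmitN_cons0 (bs : List (Nat × Nat)) (ls : List String) (l : String) :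
    pvEmitN (l :: ls) (bs.map (fun p => (p.1 + 1, p.2 + 1))) 0
      = pvDumpLine l :: pvEmitN ls bs 0 := by
  cases bs with
  | nil => simp [pvEmitN]
  | cons p bs =>
    obtain ⟨s, e⟩ := p
    simp only [List.map_cons, pvEmitN, List.drop_zero, List.drop_succ_cons,
      Nat.sub_zero, List.take_succ_cons, List.map_cons]
    rw [show e + 1 + 1 - (s + 1) = e + 1 - s by omega, pvEmitN_shift1 bs ls l (e + 1)]
    simp

lemma pvEmitN_shiftk (k : Nat) (ls : List String) (bs : List (Nat × Nat)) (prev : Nat) :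
    pvEmitN ls (bs.map (fun p => (p.1 + k, p.2 + k))) (prev + k)
      = pvEmitN (ls.drop k) bs prev := by
  induction k generalizing ls with
  | zero => simp
  | succ k ih =>
    cases ls with
    | nil => rw [pvEmitN_nil, List.drop_nil, pvEmitN_nil]
    | cons l t =>
      have hmap : bs.map (fun p => (p.1 + (k + 1), p.2 + (k + 1)))
          = (bs.map (fun p => (p.1 + k, p.2 + k))).map (fun p => (p.1 + 1, p.2 + 1)) := by
        rw [List.map_map]; apply List.map_congr_left; intro p _; simp; omega
      rw [hmap, show prev + (k + 1) = (prev + k) + 1 by omega,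
          pvEmitN_shift1 _ t l (prev + k), ih t, List.drop_succ_cons]

lemma pvPairsN_shiftk : ∀ (fs : List Nat) (k n : Nat), (fs ≠ [] → k + 1 ≤ n) →
    pvPairsN (fs.map (· + k)) n
      = (pvPairsN fs (n - k)).map (fun p => (p.1 + k, p.2 + k))
  | [], _, _, _ => by simp [pvPairsN]
  | [a], k, n, h => by
    have h1 : k + 1 ≤ n := h (by simp)
    simp only [List.map_cons, pvPairsN, List.map]
    congr 2
    omega
  | a :: b :: rest, k, n, h => by
    simp only [List.map_cons, pvPairsN]
    rw [pvPairsN_shiftk rest k n (by intro _; exact h (by simp))]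

lemma pvFencesN_nil_of (t : List String) (h : pvFencesN t = []) : pvCollectA t = (t, []) := by
  induction t with
  | nil => simp [pvCollectA]
  | cons x xs ih =>
    by_cases hf : pvIsFence x = true
    · simp [pvFencesN, hf] at h
    · simp only [Bool.not_eq_true] at hf
      simp only [pvFencesN, hf, Bool.false_eq_true, if_false, List.map_eq_nil_iff] at h
      simp [pvCollectA, hf, ih h]

lemma pvFencesN_ne_nil {t : List String} (h : pvFencesN t ≠ []) : t ≠ [] := by
  intro he; subst he; simp [pvFencesN] at h

-- first fence at index e: A's collector splits t at e+1, and the other fences are those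
-- of the remainder, shifted by e+1
lemma pvFencesN_cons_struct (t : List String) (e : Nat) (rest : List Nat)
    (h : pvFencesN t = e :: rest) :
    pvCollectA t = (t.take (e + 1), t.drop (e + 1)) ∧
      rest = (pvFencesN (t.drop (e + 1))).map (· + (e + 1)) ∧ e < t.length := by
  induction t generalizing e rest with
  | nil => simp [pvFencesN] at h
  | cons x xs ih =>
    by_cases hf : pvIsFence x = true
    · simp only [pvFencesN, hf, if_true, List.cons.injEq] at h
      obtain ⟨he, hr⟩ := h
      subst he
      refine ⟨by simp [pvCollectA, hf], by simpa using hr.symm, by simp⟩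
    · simp only [Bool.not_eq_true] at hf
      simp only [pvFencesN, hf, Bool.false_eq_true, if_false] at h
      cases hfs : pvFencesN xs with
      | nil => rw [hfs] at h; simp at h
      | cons e' rest' =>
        rw [hfs] at h
        simp only [List.map_cons, List.cons.injEq] at h
        obtain ⟨he, hr⟩ := h
        obtain ⟨hc, hrest, hlt⟩ := ih e' rest' hfs
        subst he
        refine ⟨?_, ?_, by simp only [List.length_cons]; omega⟩
        · simp only [pvCollectA, hf, Bool.false_eq_true, if_false, hc]
          simp [show e' + 1 + 1 = e' + 2 by omega]
        · rw [← hr, hrest, List.map_map]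
          simp only [List.drop_succ_cons]
          apply List.map_congr_left; intro a _; simp; omega

-- MAIN: A's nested streaming loop computes exactly B's staged locate-pair-slice assembly
lemma pvMain (n : Nat) : ∀ ls : List String, ls.length ≤ n →
    pvGoA ls = pvEmitN ls (pvPairsN (pvFencesN ls) ls.length) 0 := by
  induction n with
  | zero =>
    intro ls h
    rw [List.length_eq_zero_iff.mp (Nat.le_zero.mp h)]
    simp [pvGoA, pvFencesN, pvPairsN, pvEmitN]
  | succ n ih =>
    intro ls hlen
    cases ls with
    | nil => simp [pvGoA, pvFencesN, pvPairsN, pvEmitN]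
    | cons l t =>
      simp only [List.length_cons, Nat.succ_le_succ_iff] at hlen
      by_cases hf : pvIsFence l = true
      · -- l opens a block
        rw [pvGoA]
        simp only [hf, if_true]
        cases hfs : pvFencesN t with
        | nil =>
          -- unclosed block: runs to EOF
          have hc := pvFencesN_nil_of t hfs
          rw [hc]
          simp only [pvFencesN, hf, if_true, hfs, List.map_nil, List.length_cons]
          rw [show pvPairsN [0] (t.length + 1) = [(0, t.length)] by
                simp [pvPairsN]]
          simp only [pvEmitN, List.drop_zero, List.take_zero, List.map_nil,
            List.nil_append, Nat.sub_zero]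
          rw [List.take_of_length_le (by simp), List.drop_of_length_le (by simp)]
          simp only [List.map_nil, List.append_nil]
          rw [pvFlush_eq (l :: t) (by simpa [PySem.List.pyGetD] using hf), pvGoA]
          simp
        | cons e rest =>
          obtain ⟨hc, hrest, hlt⟩ := pvFencesN_cons_struct t e rest hfs
          rw [hc]
          simp only [pvFencesN, hf, if_true, hfs, List.map_cons, List.length_cons]
          rw [show pvPairsN (0 :: (e + 1) :: rest.map (· + 1)) (t.length + 1)
                = (0, e + 1) :: pvPairsN (rest.map (· + 1)) (t.length + 1) by
                simp [pvPairsN]]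
          simp only [pvEmitN, List.drop_zero, List.take_zero, List.map_nil,
            List.nil_append, Nat.sub_zero]
          rw [show (l :: t).take (e + 1 + 1) = l :: t.take (e + 1) by simp,
              pvFlush_eq (l :: t.take (e + 1)) (by simpa [PySem.List.pyGetD] using hf),
              show e + 1 + 1 = e + 2 from rfl]
          congr 1
          -- the tail blocks
          have hmap : rest.map (· + 1) = (pvFencesN (t.drop (e + 1))).map (· + (e + 2)) := by
            rw [hrest, List.map_map]
            apply List.map_congr_left; intro a _; simp; omega
          rw [hmap]
          by_cases hrem : pvFencesN (t.drop (e + 1)) = []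
          · rw [hrem]
            simp only [List.map_nil, pvPairsN, pvEmitN]
            rw [show (l :: t).drop (e + 2) = t.drop (e + 1) by simp,
                ih (t.drop (e + 1)) (by simp only [List.length_drop]; omega), hrem]
            simp [pvPairsN, pvEmitN]
          · have hne : t.drop (e + 1) ≠ [] := pvFencesN_ne_nil hrem
            have hlen2 : e + 1 < t.length := by
              by_contra hcon
              exact hne (List.drop_eq_nil_of_le (by omega))
            rw [pvPairsN_shiftk _ (e + 2) (t.length + 1)
                  (by intro _; omega)]
            have hsk := pvEmitN_shiftk (e + 2) (l :: t)
                (pvPairsN (pvFencesN (t.drop (e + 1))) (t.length + 1 - (e + 2))) 0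
            rw [Nat.zero_add] at hsk
            rw [hsk, show (l :: t).drop (e + 2) = t.drop (e + 1) by simp,
                show t.length + 1 - (e + 2) = (t.drop (e + 1)).length by
                  simp only [List.length_drop]; omega]
            exact ih (t.drop (e + 1)) (by simp only [List.length_drop]; omega)
      · -- ordinary line
        simp only [Bool.not_eq_true] at hf
        rw [pvGoA]
        simp only [hf, Bool.false_eq_true, if_false]
        rw [ih t hlen]
        simp only [pvFencesN, hf, Bool.false_eq_true, if_false, List.length_cons]
        rw [pvPairsN_shiftk (pvFencesN t) 1 (t.length + 1)
              (by intro hne; have := pvFencesN_ne_nil hne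
                  cases t with
                  | nil => exact absurd rfl this
                  | cons a b => simp only [List.length_cons]; omega),
            Nat.add_sub_cancel,
            pvEmitN_cons0 (pvPairsN (pvFencesN t) t.length) t l]

-- ===== VERDICT (by name: the statement is the Claim_ definition above) =====
theorem collapse_code_blocks_py_spec : Claim_equal_collapse_code_blocks_py := by
  intro text _
  unfold Spec_collapse_code_blocks_py collapse_code_blocks_py collapse_code_blocks_py_alt
  show PySem.Str.join "\n" (pvGoA ((PySem.Str.split? text "\n").getD []))
      = PySem.Str.join "\n" (pvEmitB ((PySem.Str.split? text "\n").getD [])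
          (pvPairsB (pvFencesB ((PySem.Str.split? text "\n").getD []))
            (PySem.List.len ((PySem.Str.split? text "\n").getD []))) 0)
  rw [pvAlt_eq ((PySem.Str.split? text "\n").getD []),
      ← pvMain ((PySem.Str.split? text "\n").getD []).length _ le_rfl]
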